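-- pv_equiv track=rewrite | github.com/denisbilli/PyAdventOfCode24 | exercise08.py | find_char_in_grid
-- ===== SOURCE A (Python) =====
-- def get_matrix_dimensions(matrix):
--     """
--     Ottiene il numero di righe e colonne di una matrice.
--
--     Args:
--         matrix (list of list): Matrice rappresentata come una lista di liste.
--
--     Returns:
--         tuple: Numero di righe e numero di colonne (rows, cols).
--     """
--     rows = len(matrix)
--     cols = len(matrix[0]) if matrix else 0  # Verifica che la matrice non sia vuota
--     return rows, cols
--
-- def find_char_in_grid(grid, chars, known_positions=None):
--     if known_positions is None:
--         known_positions = []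
--     rows, cols = get_matrix_dimensions(grid)
--     position = ()
--     for row in range(rows):
--         for col in range(cols):
--             for char in chars:
--                 if grid[row][col] == char and not known_positions.__contains__((row, col)):
--                     position = (row, col)
--                     break
--     return position
-- ===== SOURCE B (Python) =====
-- def find_char_in_grid(grid, chars, known_positions=None):
--     if known_positions is None:
--         known_positions = []
--     if not chars:
--         return ()
--     rows = len(grid)
--     cols = len(grid[0]) if grid else 0
--     char_set = set(chars)
--     for row in range(rows - 1, -1, -1):
--         for col in range(cols - 1, -1, -1):
--             if grid[row][col] in char_set and (row, col) not in known_positions: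
--                 return (row, col)
--     return ()
-- ===== Notes on version B (the rewrite author's own statement) =====
-- stated objective: faster
-- what changed: A exhaustively scans every cell row-major, testing each char in an inner loop and overwriting `position`; B returns () immediately for empty chars, precomputes set(chars) and scans the grid backwards (rows-1..0, cols-1..0), returning on the first qualifying cell, since the last row-major match is the first match in reverse order.
import Mathlib
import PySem

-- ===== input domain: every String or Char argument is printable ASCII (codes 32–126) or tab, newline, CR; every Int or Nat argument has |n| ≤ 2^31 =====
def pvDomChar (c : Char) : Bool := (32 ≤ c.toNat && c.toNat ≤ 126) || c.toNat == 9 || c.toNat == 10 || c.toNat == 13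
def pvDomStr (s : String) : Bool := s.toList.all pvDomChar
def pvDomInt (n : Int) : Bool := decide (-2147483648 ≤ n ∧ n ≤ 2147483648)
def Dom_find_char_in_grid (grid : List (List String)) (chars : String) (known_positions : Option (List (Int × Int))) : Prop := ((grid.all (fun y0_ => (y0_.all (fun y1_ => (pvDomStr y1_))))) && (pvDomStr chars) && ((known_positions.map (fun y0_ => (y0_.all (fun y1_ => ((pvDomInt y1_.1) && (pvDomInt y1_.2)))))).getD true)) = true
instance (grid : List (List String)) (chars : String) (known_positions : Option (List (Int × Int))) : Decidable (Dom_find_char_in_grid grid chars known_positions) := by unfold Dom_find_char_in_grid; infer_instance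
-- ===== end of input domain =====

-- B replaces A's exhaustive overwrite-as-you-go scan by an early-returning reverse scan
-- with a precomputed char set (objective: alternative; equal return value on Pre_).

-- ===== PORT A =====
-- inner `for char in chars: if … : position = (row,col); break`
def fcg_charLoop (cell : String) (row col : Nat) (kp : List (Int × Int)) : List Char → List Int → List Int
  | [], pos => pos
  | c :: rest, pos =>
    if (cell == String.mk [c]) && !(kp.contains ((row : Int), (col : Int))) then
      [(row : Int), (col : Int)]
    else fcg_charLoop cell row col kp rest pos

def find_char_in_grid (grid : List (List String)) (chars : String) (known_positions : Option (List (Int × Int))) : List Int :=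
  let kp := known_positions.getD []
  let rows := grid.length
  let cols := match grid with | [] => 0 | r :: _ => r.length   -- get_matrix_dimensions
  (List.range rows).foldl (fun pos row =>
    (List.range cols).foldl (fun pos col =>
      fcg_charLoop ((grid.getD row []).getD col "") row col kp chars.toList pos) pos) []

-- ===== PORT B =====
-- reverse scan of one row: first qualifying column, searched from high to low
def fcg_altRow (rowCells : List String) (cs : List String) (kp : List (Int × Int)) (row : Nat) : List Nat → Option (List Int)
  | [] => none
  | col :: rest =>
    if cs.contains (rowCells.getD col "") && !(kp.contains ((row : Int), (col : Int))) then
      some [(row : Int), (col : Int)]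
    else fcg_altRow rowCells cs kp row rest

-- reverse scan of the rows: return on the first row containing a qualifying cell
def fcg_altRows (grid : List (List String)) (cs : List String) (kp : List (Int × Int)) (cols : Nat) : List Nat → List Int
  | [] => []
  | row :: rest =>
    match fcg_altRow (grid.getD row []) cs kp row (List.range cols).reverse with
    | some p => p
    | none => fcg_altRows grid cs kp cols rest

def find_char_in_grid_alt (grid : List (List String)) (chars : String) (known_positions : Option (List (Int × Int))) : List Int :=
  let kp := known_positions.getD []
  if chars.toList.isEmpty then []   -- `if not chars: return ()`
  else
    let cs : PySem.Set String := PySem.Set.ofList (chars.toList.map (fun c => String.mk [c]))  -- set(chars)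
    let rows := grid.length
    let cols := match grid with | [] => 0 | r :: _ => r.length
    fcg_altRows grid cs kp cols (List.range rows).reverse

-- ===== PRECONDITION & SPEC =====
-- Pre_ excludes exactly the inputs where Python A raises: ragged grids in which some row is
-- shorter than the first row WITH chars nonempty — there A's grid[row][col] raises IndexError
-- (with chars empty A never indexes the grid and returns (), which B matches).
def Pre_find_char_in_grid (grid : List (List String)) (chars : String) (known_positions : Option (List (Int × Int))) : Prop :=
  chars.toList = [] ∨ ∀ r ∈ grid, (grid.headD []).length ≤ r.length
instance (grid : List (List String)) (chars : String) (known_positions : Option (List (Int × Int))) : Decidable (Pre_find_char_in_grid grid chars known_positions) := by unfold Pre_find_char_in_grid; infer_instance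

def pvWitness_find_char_in_grid : List (List String) × String × (Option (List (Int × Int))) :=
  ([["a", "b"], [".", "a"]], "ab", some [(1, 1)])

def Spec_find_char_in_grid (grid : List (List String)) (chars : String) (known_positions : Option (List (Int × Int))) (out : List Int) : Prop := out = find_char_in_grid_alt grid chars known_positions
instance (grid : List (List String)) (chars : String) (known_positions : Option (List (Int × Int))) (out : List Int) : Decidable (Spec_find_char_in_grid grid chars known_positions out) := by unfold Spec_find_char_in_grid; infer_instance

-- ===== CLAIM (what is proved, stated in full; the proofs are below) =====
def Claim_equal_find_char_in_grid : Prop := ∀ (grid : List (List String)) (chars : String) (known_positions : Option (List (Int × Int))), Dom_find_char_in_grid grid chars known_positions → Pre_find_char_in_grid grid chars known_positions → Spec_find_char_in_grid grid chars known_positions (find_char_in_grid grid chars known_positions)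

-- ===== LEMMAS AND PROOFS =====

-- the qualifying-cell test both programs decide, as one Bool
def fcg_q (grid : List (List String)) (chars : String) (kp : List (Int × Int)) (row col : Nat) : Bool :=
  (chars.toList.any (fun c => (grid.getD row []).getD col "" == String.mk [c]))
    && !(kp.contains ((row : Int), (col : Int)))

def fcg_out (row col : Nat) : List Int := [(row : Int), (col : Int)]

theorem fcg_charLoop_eq (cell : String) (row col : Nat) (kp : List (Int × Int)) (cs : List Char) (pos : List Int) :
    fcg_charLoop cell row col kp cs pos =
      if (cs.any (fun c => cell == String.mk [c])) && !(kp.contains ((row : Int), (col : Int))) then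
        fcg_out row col
      else pos := by
  induction cs with
  | nil => simp [fcg_charLoop]
  | cons c rest ih =>
    rw [fcg_charLoop, ih]
    cases hk : kp.contains ((row : Int), (col : Int)) <;>
      cases hc : cell == String.mk [c] <;>
        simp [List.any_cons, hc, hk, fcg_out]

theorem fcg_altRow_eq (rowCells : List String) (cs : List String) (kp : List (Int × Int)) (row : Nat) (L : List Nat) :
    fcg_altRow rowCells cs kp row L =
      (L.find? (fun col => cs.contains (rowCells.getD col "") && !(kp.contains ((row : Int), (col : Int))))).map
        (fcg_out row) := by
  induction L with
  | nil => simp [fcg_altRow]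
  | cons col rest ih =>
    rw [fcg_altRow, ih, List.find?]
    cases h : cs.contains (rowCells.getD col "") && !(kp.contains ((row : Int), (col : Int))) <;>
      simp [h, fcg_out]

-- a fold that overwrites the accumulator on every qualifying element returns the LAST
-- qualifying element's value = the value at the FIRST qualifying element of the reverse
theorem fcg_foldl_lastwrite {α β : Type} (q : α → Bool) (out : α → β) (L : List α) (init : β) :
    L.foldl (fun pos x => if q x then out x else pos) init
      = ((L.reverse.find? q).map out).getD init := by
  induction L generalizing init with
  | nil => simp
  | cons a rest ih =>
    rw [List.foldl_cons, ih, List.reverse_cons, List.find?_append]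
    cases h : rest.reverse.find? q with
    | some x => simp [h]
    | none =>
      cases ha : q a <;> simp [h, ha, List.find?]

theorem fcg_contains_set (chars : String) (cell : String) :
    (PySem.Set.ofList (chars.toList.map (fun c => String.mk [c]))).contains cell
      = chars.toList.any (fun c => cell == String.mk [c]) := by
  rw [Bool.eq_iff_iff]
  simp only [PySem.Set.contains_iff, PySem.Set.mem_ofList, List.mem_map, List.any_eq_true,
    beq_iff_eq]
  constructor
  · rintro ⟨c, h1, h2⟩; exact ⟨c, h1, h2.symm⟩
  · rintro ⟨c, h1, h2⟩; exact ⟨c, h1, h2.symm⟩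

-- A's nested overwrite fold, characterised as the backward search both sides reduce to
theorem fcg_A_eq (grid : List (List String)) (chars : String) (kp : List (Int × Int)) (cols : Nat) :
    (List.range grid.length).foldl (fun pos row =>
        (List.range cols).foldl (fun pos col =>
          fcg_charLoop ((grid.getD row []).getD col "") row col kp chars.toList pos) pos) []
      = ((((List.range grid.length).reverse.find?
            (fun row => (((List.range cols).reverse.find? (fcg_q grid chars kp row)).map (fcg_out row)).isSome)).map
          (fun row => (((List.range cols).reverse.find? (fcg_q grid chars kp row)).map (fcg_out row)).getD [])).getD []) := by
  have hinner : ∀ (pos : List Int) (row : Nat),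
      (List.range cols).foldl (fun pos col =>
        fcg_charLoop ((grid.getD row []).getD col "") row col kp chars.toList pos) pos
      = (((List.range cols).reverse.find? (fcg_q grid chars kp row)).map (fcg_out row)).getD pos := by
    intro pos row
    have h1 : (List.range cols).foldl (fun pos col =>
        fcg_charLoop ((grid.getD row []).getD col "") row col kp chars.toList pos) pos
        = (List.range cols).foldl (fun pos col =>
            if fcg_q grid chars kp row col then fcg_out row col else pos) pos := by
      apply PySem.List.foldl_congr_mem
      intro b x _
      rw [fcg_charLoop_eq]; rfl
    rw [h1, fcg_foldl_lastwrite]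
  have h2 : (List.range grid.length).foldl (fun pos row =>
      (List.range cols).foldl (fun pos col =>
        fcg_charLoop ((grid.getD row []).getD col "") row col kp chars.toList pos) pos) []
      = (List.range grid.length).foldl (fun pos row =>
          if (((List.range cols).reverse.find? (fcg_q grid chars kp row)).map (fcg_out row)).isSome then
            (((List.range cols).reverse.find? (fcg_q grid chars kp row)).map (fcg_out row)).getD []
          else pos) [] := by
    apply PySem.List.foldl_congr_mem
    intro b row _
    rw [hinner]
    cases h : ((List.range cols).reverse.find? (fcg_q grid chars kp row)).map (fcg_out row) <;> simp [h]
  rw [h2, fcg_foldl_lastwrite]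

-- ===== VERDICT (by name: the statement is the Claim_ definition above) =====
theorem find_char_in_grid_spec : Claim_equal_find_char_in_grid := by
  intro grid chars kp? _ _
  unfold Spec_find_char_in_grid find_char_in_grid find_char_in_grid_alt
  dsimp only
  generalize (match grid with | [] => 0 | r :: _ => r.length) = cols
  generalize kp?.getD [] = kp
  rw [fcg_A_eq]
  cases hce : chars.toList.isEmpty
  · -- chars nonempty: B's backward scan equals the same backward search
    simp only [hce, Bool.false_eq_true, if_false]
    have hrow : ∀ row : Nat,
        fcg_altRow (grid.getD row []) (PySem.Set.ofList (chars.toList.map (fun c => String.mk [c]))) kp row (List.range cols).reverse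
        = ((List.range cols).reverse.find? (fcg_q grid chars kp row)).map (fcg_out row) := by
      intro row
      rw [fcg_altRow_eq]
      have hp : (fun col => List.contains (PySem.Set.ofList (chars.toList.map (fun c => String.mk [c])))
            ((grid.getD row []).getD col "") && !(kp.contains ((row : Int), (col : Int))))
          = fcg_q grid chars kp row := by
        funext col
        unfold fcg_q
        rw [← PySem.Set.contains_eq_listContains, fcg_contains_set]
      rw [hp]
    have hB : ∀ (L : List Nat),
        fcg_altRows grid (PySem.Set.ofList (chars.toList.map (fun c => String.mk [c]))) kp cols L
        = ((L.find? (fun row => (((List.range cols).reverse.find? (fcg_q grid chars kp row)).map (fcg_out row)).isSome)).map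
            (fun row => (((List.range cols).reverse.find? (fcg_q grid chars kp row)).map (fcg_out row)).getD [])).getD [] := by
      intro L
      induction L with
      | nil => simp [fcg_altRows]
      | cons row rest ih =>
        rw [fcg_altRows, hrow row, List.find?]
        cases h : ((List.range cols).reverse.find? (fcg_q grid chars kp row)).map (fcg_out row) with
        | some p => simp [h]
        | none => simp [h, ih]
    rw [hB]
  · -- chars empty: both sides are []
    have hnil : chars.toList = [] := List.isEmpty_iff.mp hce
    have hq : ∀ row : Nat, fcg_q grid chars kp row = fun _ => false := by
      intro row; funext col; unfold fcg_q; rw [hnil]; rfl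
    have hn : ∀ (L : List Nat), List.find? (fun _ => false) L = none := by
      intro L; simp [List.find?_eq_none]
    simp [hce, hq, hn]
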